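-- pv_equiv track=rewrite | github.com/Ada-C16/dynamic-programming | lib/newman_conway.py | newman_conway
-- ===== SOURCE A (Python) =====
-- def newman_conway(num):
--     """ Returns a list of the Newman Conway numbers for the given value.
--         Time Complexity: O(n)
--         Space Complexity: O(1)
--     """
--     # P(1) = 1
--     # P(2) = 1
--     # for all n > 2
--     # P(n) = P(P(n - 1)) + P(n - P(n - 1))
--     # use memoization table to store values fot each calcula item
--     if num == 0:
--         raise ValueError()
--     if num == 1:
--         return "1"
--     if num == 2:
--         return "1 1"
--     record = [0] * (num + 1)
--     record[0] = 0
--     record[1] = 1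
--     result = []
--     if num > 2:
--         record[2] = 1
--
--     i = 3
--     # first 3 items
--     while i<=num:
--         record[i]
--         # P(n) = P(P(n - 1)) + P(n - P(n - 1))
--         record[i] = record[record[i-1]] + record[i- record[i-1]]
--         i +=1
--
--     i = 1
--     result = []
--     while (i <= num) :
--         #  Display the sequence element
--         result.append(record[i])
--         i += 1
--     resultOutput = [str(item) for item in result]
--     return " ".join(resultOutput)
-- ===== SOURCE B (Python) =====
-- def newman_conway(num):
--     """ Returns the Newman-Conway numbers P(1)..P(num), space-separated. """
--     if num == 0:
--         raise ValueError()
--     cache = {1: 1, 2: 1}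
--     def p(n):
--         if n not in cache:
--             pn1 = p(n - 1)
--             cache[n] = p(pn1) + p(n - pn1)
--         return cache[n]
--     return " ".join(str(p(i)) for i in range(1, num + 1))
-- ===== Notes on version B (the rewrite author's own statement) =====
-- stated objective: alternative
-- what changed: Replaces A's bottom-up preallocated table with its fill, collection and str-mapping passes by a top-down memoized recursive helper over a cache dict seeded with the two base cases, called per index while joining directly.
import Mathlib
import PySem

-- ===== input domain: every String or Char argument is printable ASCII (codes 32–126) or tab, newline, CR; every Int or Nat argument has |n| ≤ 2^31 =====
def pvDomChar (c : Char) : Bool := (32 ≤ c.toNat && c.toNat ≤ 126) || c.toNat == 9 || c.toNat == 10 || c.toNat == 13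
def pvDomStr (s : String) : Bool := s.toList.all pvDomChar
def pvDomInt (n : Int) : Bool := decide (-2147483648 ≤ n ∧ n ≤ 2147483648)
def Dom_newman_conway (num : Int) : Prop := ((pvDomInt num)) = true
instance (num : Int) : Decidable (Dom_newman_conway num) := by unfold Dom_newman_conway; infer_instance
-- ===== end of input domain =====

-- B replaces A's bottom-up preallocated table (fill loop + collection loop + str-mapping pass)
-- by a top-down memoized recursive helper over a cache dict seeded {1:1, 2:1}.

-- ===== PORT A =====
-- while i <= num: record[i] = record[record[i-1]] + record[i - record[i-1]]; i += 1
-- (record[i] = v ported as List.set i.toNat: exact here, i runs over 3..num, in range)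
def pvFillA (num : Int) (record : List Int) (i : Int) (fuel : Nat) : List Int :=
  match fuel with
  | 0 => record
  | f + 1 =>
    if i ≤ num then
      let r := PySem.List.pyGetD record (i - 1) 0
      pvFillA num
        (record.set i.toNat (PySem.List.pyGetD record r 0 + PySem.List.pyGetD record (i - r) 0))
        (i + 1) f
    else record

-- while i <= num: result.append(record[i]); i += 1
def pvCollectA (num : Int) (record : List Int) (i : Int) (acc : List Int) (fuel : Nat) : List Int :=
  match fuel with
  | 0 => acc
  | f + 1 =>
    if i ≤ num then
      pvCollectA num record (i + 1) (acc ++ [PySem.List.pyGetD record i 0]) f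
    else acc

def newman_conway (num : Int) : String :=
  if num = 0 then ""            -- Python raises ValueError here; outside Pre_
  else if num = 1 then "1"
  else if num = 2 then "1 1"
  else
    -- for num < 0 Python raises IndexError at record[0] = 0; outside Pre_
    let record := List.replicate (num + 1).toNat (0 : Int)
    let record := record.set 0 0
    let record := record.set 1 1
    let record := if num > 2 then record.set 2 1 else record
    let record := pvFillA num record 3 (num - 2).toNat
    let result := pvCollectA num record 1 [] num.toNat
    PySem.Str.join " " (result.map PySem.Int.toStr)

-- ===== PORT B =====
-- def p(n): if n not in cache: pn1 = p(n-1); cache[n] = p(pn1) + p(n - pn1); return cache[n]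
-- (the mutated closure cache is threaded as state; fuel only bounds recursion depth and is
-- never exhausted on admitted inputs, where each recursive call is a cache hit of depth ≤ 2)
def pvP (fuel : Nat) (n : Int) (cache : PySem.Dict Int Int) : Int × PySem.Dict Int Int :=
  match fuel with
  | 0 => (0, cache)
  | f + 1 =>
    if cache.contains n then (cache.getD n 0, cache)
    else
      let r1 := pvP f (n - 1) cache             -- pn1 = p(n - 1)
      let r2 := pvP f r1.1 r1.2                 -- p(pn1)
      let r3 := pvP f (n - r1.1) r2.2           -- p(n - pn1)
      let c := r3.2.insert n (r2.1 + r3.1)      -- cache[n] = …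
      (c.getD n 0, c)                           -- return cache[n]

def newman_conway_alt (num : Int) : String :=
  if num = 0 then ""            -- Python raises ValueError here; outside Pre_
  else
    let cache : PySem.Dict Int Int := (PySem.Dict.empty.insert 1 1).insert 2 1
    let st := (PySem.List.pyRange 1 (num + 1) 1).foldl
      (fun (st : List Int × PySem.Dict Int Int) i =>
        let r := pvP (i.toNat + 3) i st.2
        (st.1 ++ [r.1], r.2))
      ([], cache)
    PySem.Str.join " " (st.1.map PySem.Int.toStr)

-- ===== PRECONDITION & SPEC =====
-- Pre_ excludes exactly the nonpositive inputs, on which A raises (ValueError on 0, IndexError below 0).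
def Pre_newman_conway (num : Int) : Prop := 1 ≤ num
instance (num : Int) : Decidable (Pre_newman_conway num) := by unfold Pre_newman_conway; infer_instance
def pvWitness_newman_conway : Int := (5)

def Spec_newman_conway (num : Int) (out : String) : Prop := out = newman_conway_alt num
instance (num : Int) (out : String) : Decidable (Spec_newman_conway num out) := by unfold Spec_newman_conway; infer_instance

-- ===== CLAIM (what is proved, stated in full; the proofs are below) =====
def Claim_equal_newman_conway : Prop := ∀ (num : Int), Dom_newman_conway num → Pre_newman_conway num → Spec_newman_conway num (newman_conway num)

-- ===== LEMMAS AND PROOFS =====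

-- the Newman-Conway sequence [P 1, …, P n] as a list, grown one element at a time
def ncNext (s : List Int) : Int :=
  let p := PySem.List.pyGetD s (-1) 0
  PySem.List.pyGetD s (p - 1) 0 + PySem.List.pyGetD s ((s.length : Int) - p) 0

def ncList : Nat → List Int
  | 0 => []
  | 1 => [1]
  | 2 => [1, 1]
  | n + 3 => ncList (n + 2) ++ [ncNext (ncList (n + 2))]

-- P(j), for j ≥ 1
def Pval (j : Nat) : Int := (ncList j).getD (j - 1) 0

theorem ncLen : ∀ n, (ncList n).length = n
  | 0 => rfl
  | 1 => rfl
  | 2 => rfl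
  | n + 3 => by simp [ncList, ncLen (n + 2)]

theorem ncSucc (n : Nat) (h : 2 ≤ n) : ncList (n + 1) = ncList n ++ [ncNext (ncList n)] := by
  obtain ⟨m, rfl⟩ : ∃ m, n = m + 2 := ⟨n - 2, by omega⟩
  rfl

theorem ncGetD_succ (n i : Nat) (h : 2 ≤ n) (hi : i < n) :
    (ncList (n + 1)).getD i 0 = (ncList n).getD i 0 := by
  rw [ncSucc n h, List.getD_append _ _ _ _ (by rw [ncLen]; omega)]

-- Python indexing of ncList at a nonnegative in-range Int index
theorem getNC (m : Nat) (j : Int) (h1 : 0 ≤ j) (h2 : j < (m : Int)) :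
    PySem.List.pyGetD (ncList m) j 0 = (ncList m).getD j.toNat 0 := by
  obtain ⟨a, rfl⟩ : ∃ a : Nat, j = (a : Int) := ⟨j.toNat, by omega⟩
  rw [PySem.List.pyGetD_natCast, Int.toNat_natCast]

-- seq[-1] is the last stored value
theorem lastNC (m : Nat) (hm : 1 ≤ m) :
    PySem.List.pyGetD (ncList m) (-1) 0 = (ncList m).getD (m - 1) 0 := by
  have hlen := ncLen m
  have hne : ncList m ≠ [] := by intro hc; rw [hc] at hlen; simp at hlen; omega
  rw [PySem.List.pyGetD_neg_one _ _ hne, List.getLast_eq_getElem,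
    List.getD_eq_getElem _ _ (by omega)]
  simp [hlen]

theorem ncNextEval (m : Nat) (hm : 2 ≤ m)
    (hq1 : 1 ≤ (ncList m).getD (m - 1) 0) (hq2 : (ncList m).getD (m - 1) 0 ≤ (m : Int)) :
    ncNext (ncList m) = (ncList m).getD (((ncList m).getD (m - 1) 0).toNat - 1) 0
      + (ncList m).getD (m - ((ncList m).getD (m - 1) 0).toNat) 0 := by
  have hlen := ncLen m
  show PySem.List.pyGetD (ncList m) (PySem.List.pyGetD (ncList m) (-1) 0 - 1) 0
      + PySem.List.pyGetD (ncList m) (((ncList m).length : Int) - PySem.List.pyGetD (ncList m) (-1) 0) 0 = _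
  rw [lastNC m (by omega), hlen]
  rw [getNC m _ (by omega) (by omega), getNC m _ (by omega) (by omega)]
  rw [show ((ncList m).getD (m - 1) 0 - 1).toNat = ((ncList m).getD (m - 1) 0).toNat - 1 by omega]
  rw [show ((m : Int) - (ncList m).getD (m - 1) 0).toNat = m - ((ncList m).getD (m - 1) 0).toNat by omega]

theorem ncBounds : ∀ (n i : Nat), i < n →
    1 ≤ (ncList n).getD i 0 ∧ (ncList n).getD i 0 ≤ (i : Int) + 1
  | 0, i, hi => absurd hi (by omega)
  | 1, i, hi => by interval_cases i; simp [ncList]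
  | 2, i, hi => by interval_cases i <;> simp [ncList]
  | n + 3, i, hi => by
    rcases Nat.lt_or_ge i (n + 2) with h | h
    · rw [show n + 3 = (n + 2) + 1 from rfl, ncGetD_succ (n + 2) i (by omega) h]
      exact ncBounds (n + 2) i h
    · obtain rfl : i = n + 2 := by omega
      have hlen := ncLen (n + 2)
      have hval : (ncList (n + 3)).getD (n + 2) 0 = ncNext (ncList (n + 2)) := by
        show ((ncList (n + 2)) ++ [ncNext (ncList (n + 2))]).getD (n + 2) 0 = _
        rw [List.getD_append_right _ _ _ _ (by omega), hlen]
        simp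
      have hq := ncBounds (n + 2) (n + 1) (by omega)
      have hq1 : 1 ≤ (ncList (n + 2)).getD (n + 2 - 1) 0 := by
        rw [show n + 2 - 1 = n + 1 from by omega]; exact hq.1
      have hq2 : (ncList (n + 2)).getD (n + 2 - 1) 0 ≤ ((n + 2 : Nat) : Int) := by
        rw [show n + 2 - 1 = n + 1 from by omega]
        have := hq.2; push_cast at this ⊢; omega
      rw [hval, ncNextEval (n + 2) (by omega) hq1 hq2]
      rw [show n + 2 - 1 = n + 1 from by omega] at hq1 hq2 ⊢
      have hb1 := ncBounds (n + 2) (((ncList (n + 2)).getD (n + 1) 0).toNat - 1) (by omega)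
      have hb2 := ncBounds (n + 2) ((n + 2) - ((ncList (n + 2)).getD (n + 1) 0).toNat) (by omega)
      have c1 := hb1.1; have c2 := hb1.2; have c3 := hb2.1; have c4 := hb2.2
      push_cast at c2 c4 ⊢
      constructor <;> omega

-- entries of ncList do not change as the list grows: (ncList n)[j] = P(j+1)
theorem ncStable : ∀ (n j : Nat), j < n → (ncList n).getD j 0 = Pval (j + 1)
  | 0, j, h => absurd h (by omega)
  | 1, j, h => by interval_cases j; rfl
  | 2, j, h => by interval_cases j <;> rfl
  | n + 3, j, h => by
    rcases Nat.lt_or_ge j (n + 2) with h' | h'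
    · rw [show n + 3 = (n + 2) + 1 from rfl, ncGetD_succ (n + 2) j (by omega) h']
      exact ncStable (n + 2) j h'
    · obtain rfl : j = n + 2 := by omega
      rfl

theorem PvalBounds (j : Nat) (h : 1 ≤ j) : 1 ≤ Pval j ∧ Pval j ≤ (j : Int) := by
  have := ncBounds j (j - 1) (by omega)
  unfold Pval
  constructor
  · exact this.1
  · have := this.2; push_cast at this ⊢; omega

theorem Pval_succ (m : Nat) (hm : 2 ≤ m) : Pval (m + 1) = ncNext (ncList m) := by
  unfold Pval
  rw [show m + 1 - 1 = m from by omega, ncSucc m hm,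
    List.getD_append_right _ _ _ _ (by rw [ncLen]), ncLen]
  simp

-- the memo cache after the values 1..max m 2 have been computed
def ncCache : Nat → PySem.Dict Int Int
  | 0 => ((PySem.Dict.empty : PySem.Dict Int Int).insert 1 1).insert 2 1
  | 1 => ((PySem.Dict.empty : PySem.Dict Int Int).insert 1 1).insert 2 1
  | 2 => ((PySem.Dict.empty : PySem.Dict Int Int).insert 1 1).insert 2 1
  | m + 3 => (ncCache (m + 2)).insert ((m + 3 : Nat) : Int) (Pval (m + 3))

theorem get_ncCache : ∀ (m : Nat) (j : Int),
    (ncCache m).get? j = if 1 ≤ j ∧ j ≤ ((max m 2 : Nat) : Int) then some (Pval j.toNat) else none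
  | 0, j => by
    have hmax : ((max 0 2 : Nat) : Int) = 2 := rfl
    rw [hmax]
    simp only [ncCache, PySem.Dict.get?_insert, PySem.Dict.get?_empty]
    rcases eq_or_ne j 2 with rfl | h2
    · rw [if_pos rfl, if_pos (by omega)]; rfl
    · rw [if_neg h2]
      rcases eq_or_ne j 1 with rfl | h1
      · rw [if_pos rfl, if_pos (by omega)]; rfl
      · rw [if_neg h1, if_neg (by omega)]
  | 1, j => get_ncCache 0 j
  | 2, j => get_ncCache 0 j
  | m + 3, j => by
    rw [ncCache, PySem.Dict.get?_insert, get_ncCache (m + 2) j]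
    split_ifs with h1 h2 h2 <;> try (exfalso; push_cast at *; omega)
    · subst h1; rw [Int.toNat_natCast]
    · rfl
    · rfl

theorem pvP_hit (f : Nat) (m : Nat) (j : Int) (h1 : 1 ≤ j) (h2 : j ≤ ((max m 2 : Nat) : Int)) :
    pvP (f + 1) j (ncCache m) = (Pval j.toNat, ncCache m) := by
  have hg : (ncCache m).get? j = some (Pval j.toNat) := by
    rw [get_ncCache m j, if_pos ⟨h1, h2⟩]
  rw [pvP, if_pos (by rw [PySem.Dict.contains_eq_isSome_get?, hg]; rfl)]
  rw [PySem.Dict.getD_eq_get?_getD, hg]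
  rfl

theorem pvP_step (f : Nat) (m : Nat) (hm : 2 ≤ m) :
    pvP (f + 2) ((m : Int) + 1) (ncCache m) = (Pval (m + 1), ncCache (m + 1)) := by
  have hmax : ((max m 2 : Nat) : Int) = (m : Int) := by
    rw [max_eq_left hm]
  have hb := PvalBounds m (by omega)
  have hmiss : (ncCache m).get? ((m : Int) + 1) = none := by
    rw [get_ncCache m, if_neg (by push_cast at hmax ⊢; omega)]
  rw [pvP, if_neg (by rw [PySem.Dict.contains_eq_isSome_get?, hmiss]; simp)]
  simp only [show (m : Int) + 1 - 1 = (m : Int) from by ring]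
  -- p(m) : hit
  rw [pvP_hit (f) m (m : Int) (by omega) (by omega), Int.toNat_natCast]
  -- Pval m as a list entry (needed to connect with ncNextEval)
  have hPm : Pval m = (ncList m).getD (m - 1) 0 := rfl
  -- p(P(m)) : hit
  rw [pvP_hit (f) m (Pval m) hb.1 (by omega)]
  -- p(m + 1 - P(m)) : hit
  rw [pvP_hit (f) m ((m : Int) + 1 - Pval m) (by omega) (by omega)]
  -- identify the computed sum with P(m+1)
  have hsum : Pval ((Pval m).toNat) + Pval (((m : Int) + 1 - Pval m).toNat) = Pval (m + 1) := by
    rw [Pval_succ m hm, ncNextEval m hm (hPm ▸ hb.1) (hPm ▸ hb.2)]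
    rw [← hPm]
    congr 1
    · rw [ncStable m ((Pval m).toNat - 1) (by omega),
        show (Pval m).toNat - 1 + 1 = (Pval m).toNat from by omega]
    · rw [ncStable m (m - (Pval m).toNat) (by omega)]
      congr 1
      omega
  have hcache : (ncCache m).insert ((m : Int) + 1) (Pval ((Pval m).toNat) + Pval (((m : Int) + 1 - Pval m).toNat))
      = ncCache (m + 1) := by
    obtain ⟨k, rfl⟩ : ∃ k, m = k + 2 := ⟨m - 2, by omega⟩
    rw [hsum, show ((k + 2 : Nat) : Int) + 1 = ((k + 3 : Nat) : Int) from by push_cast; ring]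
    rfl
  rw [hsum] at hcache
  simp only [hsum, hcache]
  have hget1 : (ncCache (m + 1)).get? ((m : Int) + 1) = some (Pval (m + 1)) := by
    rw [get_ncCache (m + 1), if_pos (by constructor <;> [omega; (rw [max_eq_left (by omega)]; omega)])]
    rw [show ((m : Int) + 1).toNat = m + 1 from by omega]
  rw [PySem.Dict.getD_eq_get?_getD, hget1]
  rfl

-- the driver fold computes [P 1, …, P n] and the full cache
theorem driveB : ∀ (n : Nat), 1 ≤ n →
    (PySem.List.pyRange 1 ((n : Int) + 1) 1).foldl
      (fun (st : List Int × PySem.Dict Int Int) i =>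
        let r := pvP (i.toNat + 3) i st.2
        (st.1 ++ [r.1], r.2))
      ([], ncCache 0) = (ncList n, ncCache n)
  | 0, h => absurd h (by omega)
  | 1, _ => by
    rw [show ((1 : Nat) : Int) + 1 = 1 + 1 from by norm_num, PySem.List.pyRange_one_singleton]
    simp only [List.foldl_cons, List.foldl_nil]
    rw [show ((1 : Int).toNat + 3) = 3 + 1 from rfl, pvP_hit 3 0 1 (by omega) (by norm_num)]
    rfl
  | n + 2, _ => by
    have hn1 : 1 ≤ n + 1 := by omega
    have hsplit : PySem.List.pyRange 1 (((n + 2 : Nat) : Int) + 1) 1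
        = PySem.List.pyRange 1 (((n + 1 : Nat) : Int) + 1) 1 ++ [((n + 1 : Nat) : Int) + 1] := by
      rw [show (((n + 2 : Nat) : Int) + 1) = (((n + 1 : Nat) : Int) + 1) + 1 from by push_cast; ring,
        PySem.List.pyRange_one_succ_right (by push_cast; omega)]
    rw [hsplit, List.foldl_append, driveB (n + 1) hn1]
    simp only [List.foldl_cons, List.foldl_nil]
    rcases Nat.lt_or_ge n 1 with hn | hn
    · -- n = 0 : i = 2 is still a cache hit
      obtain rfl : n = 0 := by omega
      rw [show (((0 + 1 : Nat) : Int) + 1) = (2 : Int) from by norm_num]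
      rw [show ((2 : Int).toNat + 3) = 4 + 1 from rfl, pvP_hit 4 1 2 (by omega) (by norm_num)]
      rfl
    · -- n ≥ 1 : i = n + 2 is computed by the recursive step
      have h2 : 2 ≤ n + 1 := by omega
      rw [show (((n + 1 : Nat) : Int) + 1).toNat + 3 = (n + 3) + 2 from by
        rw [show (((n + 1 : Nat) : Int) + 1) = ((n + 2 : Nat) : Int) from by push_cast; ring,
          Int.toNat_natCast]]
      rw [pvP_step _ (n + 1) h2]
      rw [show (n + 1) + 1 = n + 2 from rfl]
      rw [ncSucc (n + 1) h2, ← Pval_succ (n + 1) h2]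

theorem altEval (n : Nat) (hn : 1 ≤ n) :
    newman_conway_alt (n : Int) = PySem.Str.join " " ((ncList n).map PySem.Int.toStr) := by
  simp only [newman_conway_alt]
  rw [if_neg (by omega)]
  have := driveB n hn
  rw [show ((PySem.Dict.empty : PySem.Dict Int Int).insert 1 1).insert 2 1 = ncCache 0 from rfl, this]

-- indexing the A-side record 0 :: ncList m ++ z at 1 ≤ j ≤ m
theorem getRec (m : Nat) (z : List Int) (j : Int) (h1 : 1 ≤ j) (h2 : j ≤ (m : Int)) :
    PySem.List.pyGetD (0 :: ncList m ++ z) j 0 = (ncList m).getD (j.toNat - 1) 0 := by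
  obtain ⟨a, rfl⟩ : ∃ a : Nat, j = ((a : Int) + 1) := ⟨(j - 1).toNat, by omega⟩
  have ha : a < m := by omega
  rw [show ((a : Int) + 1) = (((a + 1 : Nat)) : Int) by push_cast; ring]
  rw [PySem.List.pyGetD_natCast, Int.toNat_natCast]
  show ((0 : Int) :: (ncList m ++ z)).getD (a + 1) 0 = _
  rw [List.getD_cons_succ, List.getD_append _ _ _ _ (by rw [ncLen]; omega)]
  rw [show a + 1 - 1 = a from by omega]

theorem fillA_eq (f : Nat) : ∀ (m n : Nat), 2 ≤ m → m + f = n →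
    pvFillA (n : Int) (0 :: ncList m ++ List.replicate (n - m) 0) ((m : Int) + 1) f
      = 0 :: ncList n := by
  induction f with
  | zero =>
    intro m n hm h
    obtain rfl : m = n := h
    simp [pvFillA]
  | succ f ih =>
    intro m n hm h
    have hmn : m + 1 ≤ n := by omega
    have hmlen := ncLen m
    rw [pvFillA, if_pos (by omega)]
    show pvFillA (n : Int)
        ((0 :: ncList m ++ List.replicate (n - m) 0).set ((m : Int) + 1).toNat
          (PySem.List.pyGetD (0 :: ncList m ++ List.replicate (n - m) 0)
              (PySem.List.pyGetD (0 :: ncList m ++ List.replicate (n - m) 0) ((m : Int) + 1 - 1) 0) 0 +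
            PySem.List.pyGetD (0 :: ncList m ++ List.replicate (n - m) 0)
              ((m : Int) + 1 - PySem.List.pyGetD (0 :: ncList m ++ List.replicate (n - m) 0) ((m : Int) + 1 - 1) 0) 0))
        ((m : Int) + 1 + 1) f = 0 :: ncList n
    have hq := ncBounds m (m - 1) (by omega)
    have hq1 : 1 ≤ (ncList m).getD (m - 1) 0 := hq.1
    have hq2 : (ncList m).getD (m - 1) 0 ≤ (m : Int) := by
      have := hq.2; push_cast at this; omega
    have hr : PySem.List.pyGetD (0 :: ncList m ++ List.replicate (n - m) 0) ((m : Int) + 1 - 1) 0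
        = (ncList m).getD (m - 1) 0 := by
      rw [getRec m _ _ (by omega) (by omega)]
      congr 1; omega
    rw [hr]
    have hv1 : PySem.List.pyGetD (0 :: ncList m ++ List.replicate (n - m) 0)
        ((ncList m).getD (m - 1) 0) 0
        = (ncList m).getD (((ncList m).getD (m - 1) 0).toNat - 1) 0 := by
      rw [getRec m _ _ hq1 hq2]
    have hv2 : PySem.List.pyGetD (0 :: ncList m ++ List.replicate (n - m) 0)
        ((m : Int) + 1 - (ncList m).getD (m - 1) 0) 0
        = (ncList m).getD (m - ((ncList m).getD (m - 1) 0).toNat) 0 := by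
      rw [getRec m _ _ (by omega) (by omega)]
      congr 1; omega
    rw [hv1, hv2, ← ncNextEval m hm hq1 hq2]
    have hset : (0 :: ncList m ++ List.replicate (n - m) 0).set ((m : Int) + 1).toNat (ncNext (ncList m))
        = 0 :: ncList (m + 1) ++ List.replicate (n - (m + 1)) 0 := by
      rw [show ((m : Int) + 1).toNat = m + 1 by omega]
      rw [show List.replicate (n - m) (0 : Int) = 0 :: List.replicate (n - (m + 1)) 0 from by
        rw [show n - m = (n - (m + 1)) + 1 by omega, List.replicate_succ]]
      rw [show ((0 : Int) :: ncList m ++ 0 :: List.replicate (n - (m + 1)) 0)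
          = ((0 : Int) :: ncList m) ++ 0 :: List.replicate (n - (m + 1)) 0 from rfl]
      rw [List.set_append_right _ _ (by simp [hmlen])]
      rw [show m + 1 - ((0 : Int) :: ncList m).length = 0 from by simp [hmlen]]
      rw [List.set_cons_zero, ncSucc m hm]
      simp
    rw [hset]
    have := ih (m + 1) n (by omega) (by omega)
    rw [show ((m + 1 : Nat) : Int) + 1 = (m : Int) + 1 + 1 by push_cast; ring] at this
    exact this

theorem collectA_eq (f : Nat) : ∀ (i n : Nat) (acc : List Int), i + f = n →
    pvCollectA (n : Int) (0 :: ncList n) ((i : Int) + 1) acc f = acc ++ (ncList n).drop i := by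
  induction f with
  | zero =>
    intro i n acc h
    obtain rfl : i = n := h
    rw [pvCollectA, List.drop_of_length_le (by rw [ncLen]), List.append_nil]
  | succ f ih =>
    intro i n acc h
    rw [pvCollectA, if_pos (by omega)]
    have hget : PySem.List.pyGetD (0 :: ncList n) ((i : Int) + 1) 0 = (ncList n).getD i 0 := by
      have hg := getRec n [] ((i : Int) + 1) (by omega) (by omega)
      rw [List.append_nil] at hg
      rw [hg, show ((i : Int) + 1).toNat = i + 1 by omega, show i + 1 - 1 = i from by omega]
    rw [hget]
    have hrec := ih (i + 1) n (acc ++ [(ncList n).getD i 0]) (by omega)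
    rw [show ((i + 1 : Nat) : Int) + 1 = ((i : Int) + 1) + 1 by push_cast; ring] at hrec
    rw [hrec, List.append_assoc]
    congr 1
    rw [List.getD_eq_getElem _ _ (by rw [ncLen]; omega)]
    exact (List.drop_eq_getElem_cons (by rw [ncLen]; omega)).symm

-- ===== VERDICT (by name: the statement is the Claim_ definition above) =====
theorem newman_conway_spec : Claim_equal_newman_conway := by
  intro num hdom hpre
  unfold Spec_newman_conway
  unfold Pre_newman_conway at hpre
  obtain ⟨n, rfl⟩ : ∃ n : Nat, num = (n : Int) := ⟨num.toNat, by omega⟩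
  have hn1 : 1 ≤ n := by omega
  rw [altEval n hn1]
  rcases Nat.lt_or_ge n 3 with h3 | h3
  · interval_cases n <;> rfl
  -- n ≥ 3 : A side
  simp only [newman_conway]
  rw [if_neg (by omega), if_neg (by omega), if_neg (by omega)]
  rw [show ((n : Int) + 1).toNat = n + 1 by omega]
  rw [show List.replicate (n + 1) (0 : Int) = 0 :: 0 :: 0 :: List.replicate (n - 2) 0 from by
    rw [show n + 1 = ((n - 2) + 1 + 1 + 1 : Nat) by omega]
    simp [List.replicate_succ]]
  simp only [List.set_cons_zero, List.set_cons_succ]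
  rw [if_pos (by omega)]
  rw [show ((0 : Int) :: 1 :: 1 :: List.replicate (n - 2) 0)
      = (0 : Int) :: ncList 2 ++ List.replicate (n - 2) 0 from rfl]
  rw [show ((n : Int) - 2).toNat = n - 2 by omega]
  rw [show (3 : Int) = ((2 : Nat) : Int) + 1 by norm_num]
  rw [fillA_eq (n - 2) 2 n (by omega) (by omega)]
  rw [Int.toNat_natCast]
  rw [show (1 : Int) = ((0 : Nat) : Int) + 1 by norm_num]
  have hcol := collectA_eq n 0 n [] (by omega)
  simp only [List.nil_append, List.drop_zero] at hcol
  rw [hcol]
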